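-- pv_equiv track=rewrite | github.com/HackBulgaria/Programming101-Python | week01/Final-Round/finalround.py | take_same
-- ===== SOURCE A (Python) =====
-- def take_same(items):
--     first = items[0]
--     n = len(items)
--     index = 1
--     result = [first]
--
--     while index < n and first == items[index]:
--         result.append(items[index])
--         index += 1
--
--     return result
-- ===== SOURCE B (Python) =====
-- def take_same(items):
--     first = items[0]
--     k = len(items)
--     for i, (x, y) in enumerate(zip(items, items[1:])):
--         if x != y:
--             k = i + 1
--             break
--     return [first] * k
-- ===== Notes on version B (the rewrite author's own statement) =====
-- stated objective: alternative
-- what changed: B finds the run boundary by scanning adjacent pairs (zip of the list with its tail) for the first inequality and then builds the result by replication [first]*k, instead of A's index walk comparing each element to the first and appending it.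
import Mathlib
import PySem

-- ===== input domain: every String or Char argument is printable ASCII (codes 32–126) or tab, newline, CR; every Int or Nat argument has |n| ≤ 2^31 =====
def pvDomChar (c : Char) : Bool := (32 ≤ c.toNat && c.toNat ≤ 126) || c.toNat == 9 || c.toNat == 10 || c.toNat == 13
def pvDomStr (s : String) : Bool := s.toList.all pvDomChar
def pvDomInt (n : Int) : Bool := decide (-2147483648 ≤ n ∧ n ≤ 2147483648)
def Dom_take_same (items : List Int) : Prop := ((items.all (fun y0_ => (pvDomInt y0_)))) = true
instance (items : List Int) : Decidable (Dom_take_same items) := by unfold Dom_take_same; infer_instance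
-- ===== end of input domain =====

-- B locates the run boundary by scanning adjacent pairs for the first inequality and
-- builds the result by replicating the first element; return values agree on non-empty lists.

-- ===== PORT A =====
-- A's while loop: index walks from 1 while items[index] equals first, appending to result.
def take_same_go (items : List Int) (first : Int) (n : Int) (index : Int) (result : List Int) : List Int :=
  if _h : index < n ∧ ((PySem.List.pyGet? items index).map (fun v => first == v)).getD false then
    take_same_go items first n (index + 1) (result ++ [(PySem.List.pyGet? items index).getD 0])
  else
    result
termination_by (n - index).toNat
decreasing_by omega

def take_same (items : List Int) : List Int :=
  match PySem.List.pyGet? items 0 with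
  | none => []   -- Python raises IndexError here; excluded by Pre_take_same
  | some first => take_same_go items first (items.length : Int) 1 [first]

-- ===== PORT B =====
-- B's for loop over enumerate(zip(items, items[1:])) with break: first index of an unequal pair.
def pvFindBreak (pairs : List (Int × Int)) (i : Nat) : Option Nat :=
  match pairs with
  | [] => none
  | (x, y) :: rest => if x ≠ y then some i else pvFindBreak rest (i + 1)

def take_same_alt (items : List Int) : List Int :=
  match PySem.List.pyGet? items 0 with
  | none => []   -- Python raises IndexError here; excluded by Pre_take_same
  | some first =>
    let k := ((pvFindBreak (items.zip items.tail) 0).map (· + 1)).getD items.length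
    List.replicate k first

-- ===== PRECONDITION & SPEC =====
-- A raises IndexError on the empty list (items[0]); only that input is excluded.
def Pre_take_same (items : List Int) : Prop := items ≠ []
instance (items : List Int) : Decidable (Pre_take_same items) := by unfold Pre_take_same; infer_instance
def pvWitness_take_same : List Int := [3, 3, 1]

def Spec_take_same (items : List Int) (out : List Int) : Prop := out = take_same_alt items
instance (items : List Int) (out : List Int) : Decidable (Spec_take_same items out) := by unfold Spec_take_same; infer_instance

-- ===== CLAIM (what is proved, stated in full; the proofs are below) =====
def Claim_equal_take_same : Prop := ∀ (items : List Int), Dom_take_same items → Pre_take_same items → Spec_take_same items (take_same items)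

-- ===== LEMMAS AND PROOFS =====

lemma take_same_go_eq (items : List Int) (first : Int) (i : Nat) (result : List Int) :
    take_same_go items first (items.length : Int) (i : Int) result
      = result ++ (items.drop i).takeWhile (fun x => x == first) := by
  induction h : items.length - i generalizing i result with
  | zero =>
    rw [take_same_go]
    have hi : items.length ≤ i := by omega
    have : ¬ ((i : Int) < (items.length : Int)) := by exact_mod_cast Nat.not_lt.mpr hi
    simp [this, List.drop_eq_nil_of_le hi]
  | succ k ih =>
    have hi : i < items.length := by omega
    have hget : PySem.List.pyGet? items (i : Int) = some (items[i]) := by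
      simpa using PySem.List.pyGet?_natCast items i hi
    rw [take_same_go]
    have hdrop : items.drop i = items[i] :: items.drop (i + 1) :=
      List.drop_eq_getElem_cons hi
    by_cases heq : first == items[i]
    · have hcond : ((i : Int) < (items.length : Int)) ∧
          ((PySem.List.pyGet? items (i : Int)).map (fun v => first == v)).getD false := by
        refine ⟨by exact_mod_cast hi, by simp [hget, heq]⟩
      rw [dif_pos hcond]
      have : ((i : Int) + 1) = ((i + 1 : Nat) : Int) := by push_cast; ring
      rw [hget, this, ih (i + 1) _ (by omega)]
      have heq' : (items[i] == first) = true := by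
        have : first = items[i] := beq_iff_eq.mp heq
        simp [this]
      rw [hdrop, List.takeWhile_cons, if_pos heq']
      simp
    · have hcond : ¬ (((i : Int) < (items.length : Int)) ∧
          ((PySem.List.pyGet? items (i : Int)).map (fun v => first == v)).getD false) := by
        simp [hget, heq]
      rw [dif_neg hcond]
      have heq' : (items[i] == first) = false := by
        have : first ≠ items[i] := by simpa using heq
        simp [beq_iff_eq]; omega
      rw [hdrop, List.takeWhile_cons, if_neg (by simp [heq'])]
      simp

lemma pvFindBreak_shift (pairs : List (Int × Int)) (i : Nat) :
    pvFindBreak pairs i = (pvFindBreak pairs 0).map (· + i) := by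
  induction pairs generalizing i with
  | nil => simp [pvFindBreak]
  | cons p rest ih =>
    obtain ⟨x, y⟩ := p
    by_cases hxy : x = y
    · rw [pvFindBreak, if_neg (by simp [hxy]), ih (i + 1)]
      conv_rhs => rw [pvFindBreak, if_neg (by simp [hxy]), ih 1]
      cases pvFindBreak rest 0 <;> simp <;> omega
    · simp [pvFindBreak, hxy]

-- B's replicated result equals the head consed onto the takeWhile of the tail.
lemma replicate_eq_takeWhile (a : Int) (rest : List Int) :
    List.replicate
      ((((pvFindBreak ((a :: rest).zip rest) 0).map (· + 1)).getD (a :: rest).length)) a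
      = a :: rest.takeWhile (fun x => x == a) := by
  induction rest generalizing a with
  | nil => simp [pvFindBreak]
  | cons b t ih =>
    by_cases hab : a = b
    · subst hab
      rw [show ((a :: a :: t).zip (a :: t)) = (a, a) :: ((a :: t).zip t) by simp [List.zip]]
      rw [pvFindBreak, if_neg (by simp), pvFindBreak_shift]
      have := ih a
      rw [List.takeWhile_cons, if_pos (by simp)]
      cases h : pvFindBreak ((a :: t).zip t) 0 with
      | none =>
        simp only [h, Option.map_none, Option.getD_none] at this ⊢
        simp only [List.length_cons] at this ⊢
        rw [show t.length + 1 + 1 = (t.length + 1) + 1 from rfl, List.replicate_succ, this]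
      | some j =>
        simp only [h, Option.map_some, Option.getD_some] at this ⊢
        rw [show j + 1 + 1 = (j + 1) + 1 from rfl, List.replicate_succ, this]
    · rw [show ((a :: b :: t).zip (b :: t)) = (a, b) :: ((b :: t).zip t) by simp [List.zip]]
      rw [pvFindBreak, if_pos (by simp [hab])]
      rw [List.takeWhile_cons, if_neg (by simp [Ne.symm hab])]
      simp

-- ===== VERDICT (by name: the statement is the Claim_ definition above) =====
theorem take_same_spec : Claim_equal_take_same := by
  intro items _ hpre
  unfold Spec_take_same
  match items, hpre with
  | a :: rest, _ =>
    have hget : PySem.List.pyGet? (a :: rest) (0 : Int) = some a := by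
      simpa using PySem.List.pyGet?_natCast (a :: rest) 0 (by simp)
    simp only [take_same, take_same_alt, hget]
    simp only [List.tail_cons]
    rw [replicate_eq_takeWhile]
    simpa using take_same_go_eq (a :: rest) a 1 [a]
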